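-- pv_equiv track=rewrite | github.com/erzhu419/Assumption-Agent | phase four/exp18_trigger_indexed_library.py | trigger_retrieval_topk
-- ===== SOURCE A (Python) =====
-- def trigger_retrieval_topk(problem_triggers, wisdom_triggers, k=2):
--     """Return top-k wisdom_ids with max overlap of triggers."""
--     scores = []
--     for wid, wtrigs in wisdom_triggers.items():
--         overlap = len(set(problem_triggers) & set(wtrigs))
--         if overlap > 0:
--             scores.append((overlap, wid))
--     scores.sort(reverse=True)
--     return [wid for _, wid in scores[:k]]
-- ===== SOURCE B (Python) =====
-- def place(p, top, cap):
--     """Binary-search p's slot in the descending buffer top, insert it, truncate to cap."""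
--     if cap <= 0:
--         return []
--     lo, hi = 0, len(top)
--     while lo < hi:
--         mid = (lo + hi) // 2
--         if top[mid] < p:
--             hi = mid
--         else:
--             lo = mid + 1
--     return (top[:lo] + [p] + top[lo:])[:cap]
--
--
-- def trigger_retrieval_topk(problem_triggers, wisdom_triggers, k=2):
--     """Return top-k wisdom_ids with max overlap of triggers."""
--     pset = set(problem_triggers)
--     top = []
--     for wid, wtrigs in wisdom_triggers.items():
--         overlap = sum(1 for t in set(wtrigs) if t in pset)
--         if overlap > 0:
--             top = place((overlap, wid), top, k)
--     return [wid for _, wid in top]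
-- ===== Notes on version B (the rewrite author's own statement) =====
-- stated objective: faster
-- what changed: B builds set(problem_triggers) once instead of once per wisdom entry and replaces 'score everything then fully sort then slice' with a single pass maintaining a k-bounded descending buffer by ordered insertion, so only the running top-k is ever held.
-- intended difference: For negative k with more than |k| overlapping wisdom entries, A's scores[:k] accidentally returns all but the last |k| scored ids (Python negative-slice), while B returns [], the intended answer for a top-k request with no positive k. — e.g. on trigger_retrieval_topk(["a", "b"], [("u", ["a"]), ("v", ["a", "b"])], -1): A returns ["v"], B returns []
import Mathlib
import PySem

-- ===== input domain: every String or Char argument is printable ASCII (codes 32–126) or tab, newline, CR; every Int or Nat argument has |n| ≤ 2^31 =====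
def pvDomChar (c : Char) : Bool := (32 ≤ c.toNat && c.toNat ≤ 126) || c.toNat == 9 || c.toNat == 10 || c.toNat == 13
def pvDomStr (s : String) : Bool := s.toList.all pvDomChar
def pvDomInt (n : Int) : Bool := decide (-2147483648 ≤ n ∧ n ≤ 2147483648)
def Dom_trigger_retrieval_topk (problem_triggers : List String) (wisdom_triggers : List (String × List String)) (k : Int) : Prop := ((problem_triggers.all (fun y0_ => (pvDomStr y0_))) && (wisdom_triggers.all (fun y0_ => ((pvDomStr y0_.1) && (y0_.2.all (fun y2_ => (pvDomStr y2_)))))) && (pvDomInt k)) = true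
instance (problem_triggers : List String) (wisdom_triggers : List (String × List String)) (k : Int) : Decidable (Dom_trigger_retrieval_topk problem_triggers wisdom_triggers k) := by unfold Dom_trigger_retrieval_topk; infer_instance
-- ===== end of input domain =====

-- B builds set(problem_triggers) once instead of once per wisdom entry and keeps only a
-- k-bounded descending buffer maintained by binary-search insertion instead of sorting all
-- scores (objective: faster); for negative k, B returns [] where A's negative slice does not (see D_).


-- ===== PORT A =====
def trigger_retrieval_topk (problem_triggers : List String) (wisdom_triggers : List (String × List String)) (k : Int) : List String :=
  let scores : List (Int × String) := wisdom_triggers.foldl (fun scores w =>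
    let overlap : Int := PySem.Set.len (PySem.Set.inter (PySem.Set.ofList problem_triggers) (PySem.Set.ofList w.2))
    if overlap > 0 then scores ++ [(overlap, w.1)] else scores) []
  let scores := PySem.List.sorted2 scores Prod.fst Prod.snd true
  (PySem.List.slice scores none (some k)).map (fun x => x.2)

-- ===== PORT B =====
-- Python tuple comparison top[mid] < p on (int, str) pairs (lexicographic)
def pairGt (p h : Int × String) : Bool := decide (h.1 < p.1) || (decide (h.1 = p.1) && decide (h.2 < p.2))

-- the `while lo < hi` binary-search loop of B's `place`; top[mid] is always in range when
-- called as place does (0 ≤ lo ≤ mid < hi ≤ len top), so the pyGetD default is never read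
def bisectLoop (p : Int × String) (top : List (Int × String)) (lo hi : Int) : Int :=
  if h : lo < hi then
    let mid := PySem.Int.floordiv (lo + hi) 2
    if pairGt p (PySem.List.pyGetD top mid (0, "")) then bisectLoop p top lo mid
    else bisectLoop p top (mid + 1) hi
  else lo
termination_by (hi - lo).toNat
decreasing_by
  · have h2 : PySem.Int.floordiv (lo + hi) 2 < hi := by
      rw [PySem.Int.floordiv_lt_iff_lt_mul (by norm_num)]; omega
    omega
  · have h1 := PySem.Int.floordiv_two_mid_bounds (le_of_lt h)
    omega

-- B's helper `place`: binary-search p's slot in the descending buffer, insert, truncate to cap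
def place (p : Int × String) (top : List (Int × String)) (cap : Int) : List (Int × String) :=
  if cap ≤ 0 then []
  else
    let lo := bisectLoop p top 0 (PySem.List.len top)
    PySem.List.slice (PySem.List.slice top none (some lo) ++ [p] ++ PySem.List.slice top (some lo) none) none (some cap)

def trigger_retrieval_topk_alt (problem_triggers : List String) (wisdom_triggers : List (String × List String)) (k : Int) : List String :=
  let pset := PySem.Set.ofList problem_triggers
  let top : List (Int × String) := wisdom_triggers.foldl (fun top w =>
    let overlap : Int := ((PySem.Set.ofList w.2).map (fun t => if PySem.Set.contains pset t then (1:Int) else 0)).sum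
    if overlap > 0 then place (overlap, w.1) top k else top) []
  top.map (fun x => x.2)

-- ===== PRECONDITION & SPEC =====
-- For negative k with more than |k| overlapping wisdom entries, A's scores[:k] accidentally
-- returns all but the last |k| scored ids (Python negative-slice); B returns [], the intended
-- answer for a top-k request with no positive k.
def D_trigger_retrieval_topk (problem_triggers : List String) (wisdom_triggers : List (String × List String)) (k : Int) : Prop :=
  k < 0 ∧ -k < ((wisdom_triggers.filter (fun w => w.2.any (fun t => problem_triggers.contains t))).length : Int)
instance (problem_triggers : List String) (wisdom_triggers : List (String × List String)) (k : Int) : Decidable (D_trigger_retrieval_topk problem_triggers wisdom_triggers k) := by unfold D_trigger_retrieval_topk; infer_instance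

def Spec_trigger_retrieval_topk (problem_triggers : List String) (wisdom_triggers : List (String × List String)) (k : Int) (out : List String) : Prop := ¬ D_trigger_retrieval_topk problem_triggers wisdom_triggers k → out = trigger_retrieval_topk_alt problem_triggers wisdom_triggers k
instance (problem_triggers : List String) (wisdom_triggers : List (String × List String)) (k : Int) (out : List String) : Decidable (Spec_trigger_retrieval_topk problem_triggers wisdom_triggers k out) := by unfold Spec_trigger_retrieval_topk; infer_instance

def pvDiffWitness_trigger_retrieval_topk : List String × (List (String × List String)) × Int :=
  (["a", "b"], [("u", ["a"]), ("v", ["a", "b"])], -1)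
def pvDiffWitnessOut_trigger_retrieval_topk : (List String) × (List String) := (["v"], [])

-- ===== CLAIM (what is proved, stated in full; the proofs are below) =====
def Claim_unchanged_trigger_retrieval_topk : Prop := ∀ (problem_triggers : List String) (wisdom_triggers : List (String × List String)) (k : Int), Dom_trigger_retrieval_topk problem_triggers wisdom_triggers k → Spec_trigger_retrieval_topk problem_triggers wisdom_triggers k (trigger_retrieval_topk problem_triggers wisdom_triggers k)
def Claim_changed_trigger_retrieval_topk : Prop := Dom_trigger_retrieval_topk (pvDiffWitness_trigger_retrieval_topk.1) (pvDiffWitness_trigger_retrieval_topk.2.1) (pvDiffWitness_trigger_retrieval_topk.2.2) ∧ D_trigger_retrieval_topk (pvDiffWitness_trigger_retrieval_topk.1) (pvDiffWitness_trigger_retrieval_topk.2.1) (pvDiffWitness_trigger_retrieval_topk.2.2) ∧ trigger_retrieval_topk (pvDiffWitness_trigger_retrieval_topk.1) (pvDiffWitness_trigger_retrieval_topk.2.1) (pvDiffWitness_trigger_retrieval_topk.2.2) = pvDiffWitnessOut_trigger_retrieval_topk.1 ∧ trigger_retrieval_topk_alt (pvDiffWitness_trigger_retrieval_topk.1) (pvDiffWitness_trigger_retrieval_topk.2.1)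 (pvDiffWitness_trigger_retrieval_topk.2.2) = pvDiffWitnessOut_trigger_retrieval_topk.2 ∧ pvDiffWitnessOut_trigger_retrieval_topk.1 ≠ pvDiffWitnessOut_trigger_retrieval_topk.2
def Claim_exact_trigger_retrieval_topk : Prop := ∀ (problem_triggers : List String) (wisdom_triggers : List (String × List String)) (k : Int), Dom_trigger_retrieval_topk problem_triggers wisdom_triggers k → D_trigger_retrieval_topk problem_triggers wisdom_triggers k → trigger_retrieval_topk problem_triggers wisdom_triggers k ≠ trigger_retrieval_topk_alt problem_triggers wisdom_triggers k

-- ===== LEMMAS AND PROOFS =====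

-- the "insert before" test that A's descending sort (sorted2 … true) uses internally
def before0 (a b : Int × String) : Bool := decide (b.1 < a.1) || (!decide (a.1 < b.1) && decide (b.2 < a.2))

-- a buffer sorted descending in Python's tuple order
def Desc (l : List (Int × String)) : Prop := l.Pairwise (fun a b => before0 b a = false)

-- A's per-entry overlap score
def ovA (pt : List String) (w2 : List String) : Int :=
  PySem.Set.len (PySem.Set.inter (PySem.Set.ofList pt) (PySem.Set.ofList w2))

-- A's scored list
def pairsA (pt : List String) (wt : List (String × List String)) : List (Int × String) :=
  wt.foldl (fun scores w => if ovA pt w.2 > 0 then scores ++ [(ovA pt w.2, w.1)] else scores) []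

lemma sorted2_rev_eq_foldl (xs : List (Int × String)) :
    PySem.List.sorted2 xs Prod.fst Prod.snd true
      = xs.foldl (fun acc x => PySem.List.insertBy before0 x acc) [] := rfl

lemma pairGt_iff (p h : Int × String) : pairGt p h = true ↔ toLex h < toLex p := by
  rw [Prod.Lex.toLex_lt_toLex]
  simp only [pairGt]
  by_cases h1 : h.1 < p.1 <;> by_cases h2 : h.1 = p.1 <;> simp [h1, h2]

lemma before0_iff (a b : Int × String) : before0 a b = true ↔ toLex b < toLex a := by
  rw [Prod.Lex.toLex_lt_toLex]
  simp only [before0]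
  by_cases h1 : b.1 < a.1 <;> by_cases h2 : a.1 < b.1 <;> simp [h1, h2] <;> omega

lemma pairGt_eq_before0 (p h : Int × String) : pairGt p h = before0 p h := by
  by_cases hb : before0 p h = true
  · rw [hb, (pairGt_iff p h).mpr ((before0_iff p h).mp hb)]
  · rw [Bool.not_eq_true] at hb
    rw [hb, Bool.eq_false_iff, Ne, pairGt_iff]
    intro hlt
    rw [Bool.eq_false_iff, Ne, before0_iff] at hb
    exact hb hlt

-- the first position of the buffer that p must go before (Python: final lo of the search)
def posW (p : Int × String) (l : List (Int × String)) : Nat :=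
  (l.takeWhile (fun y => !pairGt p y)).length

lemma posW_le (p : Int × String) (l : List (Int × String)) : posW p l ≤ l.length :=
  (List.takeWhile_prefix _).sublist.length_le

lemma takeWhile_eq_take (p : Int × String) (l : List (Int × String)) :
    l.takeWhile (fun y => !pairGt p y) = l.take (posW p l) :=
  List.prefix_iff_eq_take.mp (List.takeWhile_prefix _)

lemma dropWhile_eq_drop (p : Int × String) (l : List (Int × String)) :
    l.dropWhile (fun y => !pairGt p y) = l.drop (posW p l) := by
  have h := List.drop_left (l₁ := l.takeWhile (fun y => !pairGt p y))
    (l₂ := l.dropWhile (fun y => !pairGt p y))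
  rw [List.takeWhile_append_dropWhile] at h
  exact h.symm

lemma posW_cons_pos (p y : Int × String) (ys : List (Int × String)) (h : pairGt p y = true) :
    posW p (y :: ys) = 0 := by
  simp [posW, h]

lemma posW_cons_neg (p y : Int × String) (ys : List (Int × String)) (h : pairGt p y = false) :
    posW p (y :: ys) = posW p ys + 1 := by
  simp [posW, h]

lemma pairGt_getElem_false (p : Int × String) (l : List (Int × String)) (i : Nat)
    (hi : i < posW p l) : pairGt p (l[i]'(lt_of_lt_of_le hi (posW_le p l))) = false := by
  induction l generalizing i with
  | nil => simp [posW] at hi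
  | cons y ys ih =>
    by_cases hy : pairGt p y = true
    · rw [posW_cons_pos p y ys hy] at hi
      omega
    · rw [Bool.not_eq_true] at hy
      rw [posW_cons_neg p y ys hy] at hi
      cases i with
      | zero => simpa using hy
      | succ i =>
        simp only [List.getElem_cons_succ]
        exact ih i (by omega)

lemma pairGt_getElem_posW (p : Int × String) (l : List (Int × String))
    (h : posW p l < l.length) : pairGt p (l[posW p l]'h) = true := by
  induction l with
  | nil => simp at h
  | cons y ys ih =>
    by_cases hy : pairGt p y = true
    · simp [posW_cons_pos p y ys hy, hy]
    · rw [Bool.not_eq_true] at hy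
      have hc := posW_cons_neg p y ys hy
      have h' : posW p ys < ys.length := by
        rw [hc] at h
        simpa using h
      have := ih h'
      simp only [hc, List.getElem_cons_succ]
      exact this

lemma pairGt_getElem_true (p : Int × String) (l : List (Int × String)) (hdesc : Desc l)
    (i : Nat) (hi : i < l.length) (hW : posW p l ≤ i) : pairGt p (l[i]'hi) = true := by
  rcases eq_or_lt_of_le hW with heq | hlt
  · exact heq ▸ pairGt_getElem_posW p l (heq ▸ hi)
  · have hw := pairGt_getElem_posW p l (lt_trans hlt hi)
    rw [pairGt_iff] at hw ⊢
    have hpw : before0 (l[i]'hi) (l[posW p l]'(lt_trans hlt hi)) = false :=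
      List.pairwise_iff_getElem.mp hdesc _ _ _ _ hlt
    rw [Bool.eq_false_iff, Ne, before0_iff, not_lt] at hpw
    exact lt_of_le_of_lt hpw hw

lemma bisect_eq (p : Int × String) (l : List (Int × String)) (hdesc : Desc l) :
    ∀ (n : Nat) (lo hi : Int), (hi - lo).toNat ≤ n → 0 ≤ lo → lo ≤ (posW p l : Int) →
      (posW p l : Int) ≤ hi → hi ≤ (l.length : Int) → bisectLoop p l lo hi = posW p l := by
  intro n
  induction n with
  | zero =>
    intro lo hi hn h0 h1 h2 h3
    rw [bisectLoop]
    have : ¬ lo < hi := by omega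
    simp only [this, dif_neg, not_false_iff]
    omega
  | succ n ih =>
    intro lo hi hn h0 h1 h2 h3
    rw [bisectLoop]
    by_cases hlh : lo < hi
    · simp only [hlh, dif_pos]
      have hmid := PySem.Int.floordiv_two_mid_bounds (le_of_lt hlh)
      have hmidlt : PySem.Int.floordiv (lo + hi) 2 < hi := by
        rw [PySem.Int.floordiv_lt_iff_lt_mul (by norm_num)]; omega
      set mid := PySem.Int.floordiv (lo + hi) 2 with hm
      have hmr : 0 ≤ mid ∧ mid < (l.length : Int) := by omega
      rw [PySem.List.pyGetD_eq_getElem l _ hmr.1 hmr.2]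
      by_cases hg : pairGt p (l[mid.toNat]'(by omega)) = true
      · rw [if_pos hg]
        have hWmid : (posW p l : Int) ≤ mid := by
          by_contra hc
          rw [pairGt_getElem_false p l mid.toNat (by omega)] at hg
          exact absurd hg (by simp)
        exact ih lo mid (by omega) h0 h1 hWmid (by omega)
      · rw [if_neg hg]
        have hWmid : mid < (posW p l : Int) := by
          by_contra hc
          exact hg (pairGt_getElem_true p l hdesc mid.toNat (by omega) (by omega))
        exact ih (mid + 1) hi (by omega) (by omega) (by omega) h2 h3
    · simp only [hlh, dif_neg, not_false_iff]
      omega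

lemma insertBy_eq_takeWhile (p : Int × String) (l : List (Int × String)) :
    PySem.List.insertBy before0 p l
      = l.takeWhile (fun y => !before0 p y) ++ p :: l.dropWhile (fun y => !before0 p y) := by
  induction l with
  | nil => rfl
  | cons y ys ih =>
    simp only [PySem.List.insertBy, List.takeWhile, List.dropWhile]
    by_cases hb : before0 p y = true
    · simp [hb]
    · rw [Bool.not_eq_true] at hb
      simp [hb, ih]

lemma take_insertBy (p : Int × String) (l : List (Int × String)) (c : Nat) :
    (PySem.List.insertBy before0 p (l.take c)).take c = (PySem.List.insertBy before0 p l).take c := by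
  induction l generalizing c with
  | nil => simp
  | cons y ys ih =>
    cases c with
    | zero => simp
    | succ c =>
      simp only [List.take_succ_cons, PySem.List.insertBy]
      by_cases hb : before0 p y = true
      · rw [if_pos hb, if_pos hb, List.take_succ_cons, List.take_succ_cons]
        cases c with
        | zero => simp
        | succ c => simp [List.take_succ_cons, List.take_take]
      · rw [if_neg hb, if_neg hb, List.take_succ_cons, List.take_succ_cons, ih c]

lemma desc_insertBy (p : Int × String) (l : List (Int × String)) (hdesc : Desc l) :
    Desc (PySem.List.insertBy before0 p l) := by
  unfold Desc at *
  induction l with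
  | nil => simp [PySem.List.insertBy]
  | cons y ys ih =>
    rw [List.pairwise_cons] at hdesc
    obtain ⟨hy, hys⟩ := hdesc
    simp only [PySem.List.insertBy]
    by_cases hb : before0 p y = true
    · rw [if_pos hb]
      refine List.Pairwise.cons ?_ (List.Pairwise.cons hy hys)
      intro z hz
      rw [before0_iff] at hb
      rw [Bool.eq_false_iff, Ne, before0_iff, not_lt]
      rcases List.mem_cons.mp hz with rfl | hz
      · exact le_of_lt hb
      · have h2 := hy z hz
        rw [Bool.eq_false_iff, Ne, before0_iff, not_lt] at h2
        exact le_of_lt (lt_of_le_of_lt h2 hb)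
    · rw [if_neg hb]
      refine List.Pairwise.cons ?_ (ih hys)
      intro z hz
      rw [PySem.List.mem_insertBy] at hz
      rcases hz with rfl | hz
      · exact Bool.eq_false_iff.mpr hb
      · exact hy z hz

lemma place_eq (p : Int × String) (l : List (Int × String)) (cap : Int) (hdesc : Desc l) :
    place p l cap = (PySem.List.insertBy before0 p l).take cap.toNat := by
  by_cases hc : cap ≤ 0
  · have h0 : cap.toNat = 0 := by omega
    simp [place, hc, h0]
  · simp only [place, hc, if_false]
    have hlo : bisectLoop p l 0 (PySem.List.len l) = (posW p l : Int) :=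
      bisect_eq p l hdesc (l.length) 0 (PySem.List.len l)
        (by simp [PySem.List.len_eq]) le_rfl (by exact_mod_cast Nat.zero_le _)
        (by simp [PySem.List.len_eq]; exact_mod_cast posW_le p l)
        (by simp [PySem.List.len_eq])
    rw [hlo, PySem.List.slice_to_natCast, PySem.List.slice_from_natCast,
        PySem.List.slice_to _ (by omega)]
    have hfun : (fun y => !before0 p y) = (fun y => !pairGt p y) := by
      funext y; rw [pairGt_eq_before0]
    rw [insertBy_eq_takeWhile, hfun, takeWhile_eq_take, dropWhile_eq_drop]
    simp

lemma fold_place (l acc : List (Int × String)) (cap : Int) (hacc : Desc acc) :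
    l.foldl (fun top p => place p top cap) (acc.take cap.toNat)
      = (l.foldl (fun acc x => PySem.List.insertBy before0 x acc) acc).take cap.toNat := by
  induction l generalizing acc with
  | nil => rfl
  | cons x l ih =>
    simp only [List.foldl_cons]
    have hstep : place x (acc.take cap.toNat) cap = (PySem.List.insertBy before0 x acc).take cap.toNat := by
      rw [place_eq x _ cap (List.Pairwise.sublist (List.take_sublist _ _) hacc), take_insertBy]
    rw [hstep, ih (PySem.List.insertBy before0 x acc) (desc_insertBy x acc hacc)]

lemma count_swap (s t : List String) (hs : s.Nodup) (ht : t.Nodup) :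
    (s.filter (fun x => t.contains x)).length = (t.filter (fun x => s.contains x)).length := by
  have key : ∀ (a b : List String), a.Nodup →
      (a.filter (fun x => b.contains x)).length = (a.toFinset ∩ b.toFinset).card := by
    intro a b ha
    have hn : (a.filter (fun x => b.contains x)).Nodup := ha.filter _
    rw [← List.toFinset_card_of_nodup hn, List.toFinset_filter]
    congr 1
    ext x
    simp
  rw [key s t hs, key t s ht, Finset.inter_comm]

lemma ov_eq (pt w2 : List String) :
    ((PySem.Set.ofList w2).map (fun t => if PySem.Set.contains (PySem.Set.ofList pt) t then (1:Int) else 0)).sum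
      = ovA pt w2 := by
  rw [PySem.List.sum_map_ite_one_zero, List.countP_eq_length_filter]
  have h := count_swap (PySem.Set.ofList pt) (PySem.Set.ofList w2)
    (PySem.Set.nodup_ofList pt) (PySem.Set.nodup_ofList w2)
  show ((List.filter (fun x => List.contains (PySem.Set.ofList pt) x) (PySem.Set.ofList w2)).length : Int)
      = ((List.filter (fun x => List.contains (PySem.Set.ofList w2) x) (PySem.Set.ofList pt)).length : Int)
  exact_mod_cast h.symm

-- B's accumulated buffer is the truncated sort of A's scored list
lemma fold_B_eq (pt : List String) (wt : List (String × List String)) (k : Int) :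
    ∀ (acc : List (Int × String)),
      wt.foldl (fun top w =>
          if ovA pt w.2 > 0 then place (ovA pt w.2, w.1) top k else top)
        (acc.foldl (fun top p => place p top k) [])
      = ((wt.foldl (fun scores w =>
            if ovA pt w.2 > 0 then scores ++ [(ovA pt w.2, w.1)] else scores) acc).foldl
          (fun top p => place p top k) []) := by
  induction wt with
  | nil => intro acc; rfl
  | cons w ws ih =>
    intro acc
    simp only [List.foldl_cons]
    by_cases hov : ovA pt w.2 > 0
    · rw [if_pos hov, if_pos hov]
      have h := ih (acc ++ [(ovA pt w.2, w.1)])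
      rw [List.foldl_append] at h
      simpa using h
    · rw [if_neg hov, if_neg hov]
      exact ih acc

-- positivity of A's overlap is membership of some trigger of the entry in problem_triggers
lemma ovA_pos_iff (pt w2 : List String) :
    ovA pt w2 > 0 ↔ (w2.any (fun t => pt.contains t) = true) := by
  show (0 : Int) < PySem.Set.len (PySem.Set.inter (PySem.Set.ofList pt) (PySem.Set.ofList w2)) ↔ _
  have hlen : PySem.Set.len (PySem.Set.inter (PySem.Set.ofList pt) (PySem.Set.ofList w2))
      = ((PySem.Set.inter (PySem.Set.ofList pt) (PySem.Set.ofList w2)).length : Int) := by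
    simp [PySem.Set.len]
  rw [hlen]
  have : (0 : Int) < ((PySem.Set.inter (PySem.Set.ofList pt) (PySem.Set.ofList w2)).length : Int)
      ↔ ∃ x, x ∈ PySem.Set.inter (PySem.Set.ofList pt) (PySem.Set.ofList w2) := by
    rw [Int.natCast_pos, List.length_pos_iff_exists_mem]
  rw [this]
  simp only [PySem.Set.mem_inter, PySem.Set.mem_ofList, List.any_eq_true, List.contains_iff_mem]
  constructor
  · rintro ⟨x, hx1, hx2⟩; exact ⟨x, hx2, hx1⟩
  · rintro ⟨x, hx1, hx2⟩; exact ⟨x, hx2, hx1⟩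

-- length of A's scored list = number of overlapping wisdom entries
lemma pairsA_length (pt : List String) (wt : List (String × List String)) :
    (pairsA pt wt).length = (wt.filter (fun w => w.2.any (fun t => pt.contains t))).length := by
  unfold pairsA
  have key : ∀ (l : List (String × List String)) (acc : List (Int × String)),
      (l.foldl (fun scores w => if ovA pt w.2 > 0 then scores ++ [(ovA pt w.2, w.1)] else scores) acc).length
        = acc.length + (l.filter (fun w => w.2.any (fun t => pt.contains t))).length := by
    intro l
    induction l with
    | nil => intro acc; simp
    | cons w ws ih =>
      intro acc
      simp only [List.foldl_cons, List.filter_cons]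
      by_cases hov : ovA pt w.2 > 0
      · rw [if_pos hov, if_pos ((ovA_pos_iff pt w.2).mp hov), ih]
        simp
        omega
      · rw [if_neg hov, if_neg (by simpa using (ovA_pos_iff pt w.2).not.mp hov), ih]
  simpa using key wt []

-- the two closed forms of the ports
lemma A_closed (pt : List String) (wt : List (String × List String)) (k : Int) :
    trigger_retrieval_topk pt wt k
      = (PySem.List.slice (PySem.List.sorted2 (pairsA pt wt) Prod.fst Prod.snd true)
          none (some k)).map (fun x => x.2) := rfl

lemma B_closed (pt : List String) (wt : List (String × List String)) (k : Int) :
    trigger_retrieval_topk_alt pt wt k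
      = ((PySem.List.sorted2 (pairsA pt wt) Prod.fst Prod.snd true).take k.toNat).map
          (fun x => x.2) := by
  unfold trigger_retrieval_topk_alt
  simp only []
  have h1 : wt.foldl (fun top w =>
      let overlap : Int := ((PySem.Set.ofList w.2).map (fun t => if PySem.Set.contains (PySem.Set.ofList pt) t then (1:Int) else 0)).sum
      if overlap > 0 then place (overlap, w.1) top k else top) []
      = wt.foldl (fun top w =>
          if ovA pt w.2 > 0 then place (ovA pt w.2, w.1) top k else top) [] := by
    apply PySem.List.foldl_congr_mem
    intro acc w _
    simp only [ov_eq pt w.2]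
  rw [h1]
  have h2 := fold_B_eq pt wt k []
  simp only [List.foldl_nil] at h2
  rw [h2]
  have hp : wt.foldl (fun scores w =>
      if ovA pt w.2 > 0 then scores ++ [(ovA pt w.2, w.1)] else scores) [] = pairsA pt wt := rfl
  rw [hp]
  have h3 := fold_place (pairsA pt wt) [] k (by simp [Desc])
  simp only [List.take_nil] at h3
  rw [h3, ← sorted2_rev_eq_foldl]

lemma sorted_len (pt : List String) (wt : List (String × List String)) :
    (PySem.List.sorted2 (pairsA pt wt) Prod.fst Prod.snd true).length = (pairsA pt wt).length :=
  (PySem.List.sorted2_perm (pairsA pt wt) Prod.fst Prod.snd true).length_eq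

-- ===== VERDICT (by name: the statements are the Claim_ definitions above) =====
theorem trigger_retrieval_topk_spec : Claim_unchanged_trigger_retrieval_topk := by
  intro pt wt k _ hnD
  show _ = _
  rw [A_closed, B_closed]
  by_cases hk : 0 ≤ k
  · rw [PySem.List.slice_to _ hk]
  · have hcnt : ((wt.filter (fun w => w.2.any (fun t => pt.contains t))).length : Int) ≤ -k := by
      by_contra hc
      exact hnD (by unfold D_trigger_retrieval_topk; exact ⟨by omega, by omega⟩)
    rw [← pairsA_length] at hcnt
    have hk' : k = -(((-k).toNat : Nat) : Int) := by omega
    rw [hk', PySem.List.slice_to_neg_natCast _ _ (by omega), sorted_len]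
    have h1 : (pairsA pt wt).length - (-k).toNat = 0 := by omega
    have h2 : (-(((-k).toNat : Nat) : Int)).toNat = 0 := by omega
    rw [h1, h2]

theorem trigger_retrieval_topk_changed : Claim_changed_trigger_retrieval_topk := by
  unfold Claim_changed_trigger_retrieval_topk; decide

theorem trigger_retrieval_topk_tight : Claim_exact_trigger_retrieval_topk := by
  intro pt wt k _ hD
  obtain ⟨hk, hcnt⟩ := hD
  rw [← pairsA_length] at hcnt
  rw [A_closed, B_closed]
  have hk' : k = -(((-k).toNat : Nat) : Int) := by omega
  intro hcontra
  have hB : k.toNat = 0 := by omega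
  rw [hB, List.take_zero, List.map_nil, hk',
      PySem.List.slice_to_neg_natCast _ _ (by omega), sorted_len] at hcontra
  have hlen := congrArg List.length hcontra
  simp only [List.length_map, List.length_take, List.length_nil, sorted_len] at hlen
  omega
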